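-- pv_equiv track=rewrite | github.com/sinmb79/korean-voice-acting-engine | src/kva_engine/product_quality.py | _release_state
-- ===== SOURCE A (Python) =====
-- from typing import Any
--
-- def _release_state(gates: list[dict[str, Any]]) -> str:
--     statuses = {gate["status"] for gate in gates}
--     if "fail" in statuses:
--         return "blocked"
--     if "missing" in statuses:
--         return "needs_evidence"
--     if "warn" in statuses:
--         return "conditional"
--     return "ready"
-- ===== SOURCE B (Python) =====
-- _RANK = {"fail": 3, "missing": 2, "warn": 1}
-- _STATES = ("ready", "conditional", "needs_evidence", "blocked")
--
-- def _release_state(gates):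
--     worst = 0
--     for gate in gates:
--         worst = max(worst, _RANK.get(gate["status"], 0))
--     return _STATES[worst]
-- ===== Notes on version B (the rewrite author's own statement) =====
-- stated objective: alternative
-- what changed: Replaces A's set-build plus ordered chain of membership tests by a single fold computing the maximum severity rank (fail=3, missing=2, warn=1, other=0) via a rank table, then mapping that rank back to the state string.
import Mathlib
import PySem

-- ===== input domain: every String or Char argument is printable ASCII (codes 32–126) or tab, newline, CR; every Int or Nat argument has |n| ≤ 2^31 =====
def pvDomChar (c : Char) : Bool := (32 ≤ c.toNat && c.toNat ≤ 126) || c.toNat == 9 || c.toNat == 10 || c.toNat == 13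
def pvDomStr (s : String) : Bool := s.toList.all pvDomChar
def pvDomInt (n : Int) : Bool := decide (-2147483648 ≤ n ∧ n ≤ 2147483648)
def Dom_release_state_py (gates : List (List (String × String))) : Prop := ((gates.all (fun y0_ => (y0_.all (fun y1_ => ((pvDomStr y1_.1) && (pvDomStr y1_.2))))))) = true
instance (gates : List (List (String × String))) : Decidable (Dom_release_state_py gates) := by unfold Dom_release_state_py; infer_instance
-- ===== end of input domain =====

-- B changes the decomposition only: one fold over gates computing a maximum severity rank instead of A's status set plus a chain of membership tests; same cost.

-- ===== PORT A =====
-- gate["status"]: first-match lookup; Pre_ excludes gates without a "status" key (KeyError in Python), so the "" default is never reached on admitted inputs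
def pvStatus (g : List (String × String)) : String := (g.lookup "status").getD ""

def release_state_py (gates : List (List (String × String))) : String :=
  let statuses : PySem.Set String := PySem.Set.ofList (gates.map pvStatus)
  if PySem.Set.contains statuses "fail" then "blocked"
  else if PySem.Set.contains statuses "missing" then "needs_evidence"
  else if PySem.Set.contains statuses "warn" then "conditional"
  else "ready"

-- ===== PORT B =====
def pvRankTable : PySem.Dict String Int := PySem.Dict.mk [("fail", 3), ("missing", 2), ("warn", 1)]

def pvStates : List String := ["ready", "conditional", "needs_evidence", "blocked"]

def release_state_py_alt (gates : List (List (String × String))) : String :=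
  let worst : Int := gates.foldl (fun w g => max w (pvRankTable.getD (pvStatus g) 0)) 0
  PySem.List.pyGetD pvStates worst "ready"

-- ===== PRECONDITION & SPEC =====
-- Pre_ excludes exactly the inputs where some gate lacks a "status" key: Python A raises KeyError there (and so does B).
def Pre_release_state_py (gates : List (List (String × String))) : Prop :=
  ∀ g ∈ gates, (g.lookup "status").isSome = true
instance (gates : List (List (String × String))) : Decidable (Pre_release_state_py gates) := by unfold Pre_release_state_py; infer_instance

def pvWitness_release_state_py : (List (List (String × String))) := [[("status", "warn")], [("status", "pass")]]

def Spec_release_state_py (gates : List (List (String × String))) (out : String) : Prop := out = release_state_py_alt gates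
instance (gates : List (List (String × String))) (out : String) : Decidable (Spec_release_state_py gates out) := by unfold Spec_release_state_py; infer_instance

-- ===== CLAIM (what is proved, stated in full; the proofs are below) =====
def Claim_equal_release_state_py : Prop := ∀ (gates : List (List (String × String))), Dom_release_state_py gates → Pre_release_state_py gates → Spec_release_state_py gates (release_state_py gates)

-- ===== LEMMAS AND PROOFS =====

-- the rank B's table assigns to a status string
def pvRank (s : String) : Int := pvRankTable.getD s 0

theorem pvRank_eq (s : String) :
    pvRank s = if s = "fail" then 3 else if s = "missing" then 2 else if s = "warn" then 1 else 0 := by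
  by_cases h1 : s = "fail"
  · subst h1; decide
  by_cases h2 : s = "missing"
  · subst h2; decide
  by_cases h3 : s = "warn"
  · subst h3; decide
  simp only [pvRank, pvRankTable, PySem.Dict.getD, PySem.Dict.get?_mk_cons, h1, h2, h3, if_false]
  rw [if_neg (by simp [beq_iff_eq]; exact fun h => h1 h.symm),
      if_neg (by simp [beq_iff_eq]; exact fun h => h2 h.symm),
      if_neg (by simp [beq_iff_eq]; exact fun h => h3 h.symm)]
  rfl

-- A's chain of membership tests over a list of statuses equals the maximum rank B folds up
def pvWorst (ss : List String) : Int :=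
  if "fail" ∈ ss then 3 else if "missing" ∈ ss then 2 else if "warn" ∈ ss then 1 else 0

theorem pvWorst_nonneg (ss : List String) : 0 ≤ pvWorst ss := by
  unfold pvWorst; split_ifs <;> omega

theorem pvWorst_cons (s : String) (ss : List String) :
    pvWorst (s :: ss) = max (pvRank s) (pvWorst ss) := by
  unfold pvWorst
  rw [pvRank_eq]
  by_cases h1 : s = "fail" <;> by_cases h2 : s = "missing" <;> by_cases hw : s = "warn" <;>
    simp_all [List.mem_cons, eq_comm] <;> split_ifs <;> omega

theorem foldl_rank (ss : List String) (w : Int) (hw : 0 ≤ w) :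
    ss.foldl (fun w s => max w (pvRank s)) w = max w (pvWorst ss) := by
  induction ss generalizing w with
  | nil => simp [pvWorst]; omega
  | cons s ss ih =>
    simp only [List.foldl_cons]
    rw [ih (max w (pvRank s)) (le_trans hw (le_max_left _ _)), pvWorst_cons]
    omega

-- ===== VERDICT (by name: the statement is the Claim_ definition above) =====
theorem release_state_py_spec : Claim_equal_release_state_py := by
  intro gates _ _
  unfold Spec_release_state_py release_state_py release_state_py_alt
  have hfold : gates.foldl (fun w g => max w (pvRankTable.getD (pvStatus g) 0)) 0
      = pvWorst (gates.map pvStatus) := by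
    have := foldl_rank (gates.map pvStatus) 0 (le_refl 0)
    rw [List.foldl_map] at this
    simpa [pvRank, pvWorst_nonneg] using this
  rw [hfold]
  have hmem : ∀ x : String, PySem.Set.contains (PySem.Set.ofList (gates.map pvStatus)) x
      = decide (x ∈ gates.map pvStatus) := by
    intro x
    simp [PySem.Set.contains, PySem.Set.mem_ofList]
  unfold pvWorst
  by_cases hf : "fail" ∈ gates.map pvStatus <;>
    by_cases hm : "missing" ∈ gates.map pvStatus <;>
      by_cases hw : "warn" ∈ gates.map pvStatus <;>
        simp [hmem, hf, hm, hw, pvStates, PySem.List.pyGetD]
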